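-- pv_equiv track=rewrite | github.com/Multichoiceagency/boekhoudly- | app/api/upload.py | _resolve_file_type
-- ===== SOURCE A (Python) =====
-- ALLOWED_TYPES = {
--     "application/pdf": "pdf",
--     "text/csv": "csv",
--     "application/vnd.ms-excel": "csv",  # sometimes sent for CSV
--     "application/vnd.openxmlformats-officedocument.spreadsheetml.sheet": "xlsx",
--     "image/jpeg": "jpg",
--     "image/png": "png",
-- }
--
-- EXTENSION_FALLBACK = {
--     ".pdf": "pdf",
--     ".csv": "csv",
--     ".xlsx": "xlsx",
--     ".xls": "xlsx",
--     ".jpg": "jpg",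
--     ".jpeg": "jpg",
--     ".png": "png",
-- }
--
-- def _resolve_file_type(content_type: str | None, filename: str | None) -> str | None:
--     if content_type and content_type in ALLOWED_TYPES:
--         return ALLOWED_TYPES[content_type]
--     if filename:
--         lower = filename.lower()
--         for ext, ft in EXTENSION_FALLBACK.items():
--             if lower.endswith(ext):
--                 return ft
--     return None
-- ===== SOURCE B (Python) =====
-- ALLOWED_TYPES = {
--     "application/pdf": "pdf",
--     "text/csv": "csv",
--     "application/vnd.ms-excel": "csv",  # sometimes sent for CSV
--     "application/vnd.openxmlformats-officedocument.spreadsheetml.sheet": "xlsx",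
--     "image/jpeg": "jpg",
--     "image/png": "png",
-- }
--
-- EXTENSION_FALLBACK = {
--     ".pdf": "pdf",
--     ".csv": "csv",
--     ".xlsx": "xlsx",
--     ".xls": "xlsx",
--     ".jpg": "jpg",
--     ".jpeg": "jpg",
--     ".png": "png",
-- }
--
--
-- def _resolve_file_type(content_type, filename):
--     if content_type:
--         ft = ALLOWED_TYPES.get(content_type)
--         if ft is not None:
--             return ft
--     if filename:
--         # single pass: track the extension after the last '.' seen so far
--         ext = None
--         for ch in filename.lower():
--             if ch == ".":
--                 ext = "."
--             elif ext is not None: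
--                 ext = ext + ch
--         if ext is not None:
--             return EXTENSION_FALLBACK.get(ext)
--     return None
-- ===== Notes on version B (the rewrite author's own statement) =====
-- stated objective: alternative
-- what changed: The filename branch no longer scans EXTENSION_FALLBACK testing endswith per key; B makes a single pass over the lowercased filename tracking the extension after the last '.' and does one dict lookup.
import Mathlib
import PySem

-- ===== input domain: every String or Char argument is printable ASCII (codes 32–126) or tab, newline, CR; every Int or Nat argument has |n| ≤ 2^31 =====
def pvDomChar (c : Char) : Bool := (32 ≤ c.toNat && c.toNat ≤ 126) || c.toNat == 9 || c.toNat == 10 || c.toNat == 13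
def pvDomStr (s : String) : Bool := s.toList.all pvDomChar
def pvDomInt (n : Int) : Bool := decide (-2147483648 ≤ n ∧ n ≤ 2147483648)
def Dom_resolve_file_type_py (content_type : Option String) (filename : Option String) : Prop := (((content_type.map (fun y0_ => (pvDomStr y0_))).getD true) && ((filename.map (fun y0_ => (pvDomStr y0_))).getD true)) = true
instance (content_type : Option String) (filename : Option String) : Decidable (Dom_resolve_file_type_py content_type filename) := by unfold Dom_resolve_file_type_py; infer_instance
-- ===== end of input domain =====

-- B replaces A's scan over EXTENSION_FALLBACK with endswith tests by a single pass over the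
-- lowercased filename that tracks the extension after the last '.' and does one dict lookup
-- (objective: alternative / idiomatic single-pass; not claimed faster).

-- ===== PORT A =====
def pvAllowedItems : List (String × String) :=
  [("application/pdf", "pdf"), ("text/csv", "csv"), ("application/vnd.ms-excel", "csv"),
   ("application/vnd.openxmlformats-officedocument.spreadsheetml.sheet", "xlsx"),
   ("image/jpeg", "jpg"), ("image/png", "png")]

def pvExtItems : List (String × String) :=
  [(".pdf", "pdf"), (".csv", "csv"), (".xlsx", "xlsx"), (".xls", "xlsx"),
   (".jpg", "jpg"), (".jpeg", "jpg"), (".png", "png")]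

def pvAllowedTypes : PySem.Dict String String := PySem.Dict.ofList pvAllowedItems

def pvExtensionFallback : PySem.Dict String String := PySem.Dict.ofList pvExtItems

-- "for ext, ft in EXTENSION_FALLBACK.items(): if lower.endswith(ext): return ft"
def pvLoopA : List (String × String) → String → Option String
  | [], _ => none
  | (ext, ft) :: rest, lower =>
      if PySem.Str.endswith lower ext then some ft else pvLoopA rest lower

-- "if filename: lower = filename.lower(); <loop>" then "return None"
def pvFallbackA (filename : Option String) : Option String :=
  match filename with
  | none => none
  | some f => if f = "" then none else pvLoopA pvExtensionFallback.items (PySem.Str.lower f)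

def resolve_file_type_py (content_type : Option String) (filename : Option String) : Option String :=
  match content_type with
  | some c =>
      -- "if content_type and content_type in ALLOWED_TYPES: return ALLOWED_TYPES[content_type]"
      if c ≠ "" ∧ pvAllowedTypes.contains c then pvAllowedTypes.get? c
      else pvFallbackA filename
  | none => pvFallbackA filename

-- ===== PORT B =====
-- one step of B's loop body; the Python str accumulator `ext` is ported exactly as a char list
def pvStepB (st : Option (List Char)) (ch : Char) : Option (List Char) :=
  if ch = '.' then some ['.']
  else
    match st with
    | some e => some (e ++ [ch])
    | none => none

-- "if filename: ext = None; for ch in filename.lower(): …; if ext is not None: return EXTENSION_FALLBACK.get(ext)"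
def pvFallbackB (filename : Option String) : Option String :=
  match filename with
  | none => none
  | some f =>
      if f = "" then none
      else
        match (PySem.Str.lower f).toList.foldl pvStepB none with
        | some e => pvExtensionFallback.get? (String.ofList e)
        | none => none

def resolve_file_type_py_alt (content_type : Option String) (filename : Option String) : Option String :=
  match content_type with
  | some c =>
      if c = "" then pvFallbackB filename
      else
        -- "ft = ALLOWED_TYPES.get(content_type); if ft is not None: return ft"
        match pvAllowedTypes.get? c with
        | some ft => some ft
        | none => pvFallbackB filename
  | none => pvFallbackB filename

-- ===== PRECONDITION & SPEC =====
def Spec_resolve_file_type_py (content_type : Option String) (filename : Option String) (out : Option String) : Prop := out = resolve_file_type_py_alt content_type filename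
instance (content_type : Option String) (filename : Option String) (out : Option String) : Decidable (Spec_resolve_file_type_py content_type filename out) := by unfold Spec_resolve_file_type_py; infer_instance

-- ===== CLAIM (what is proved, stated in full; the proofs are below) =====
def Claim_equal_resolve_file_type_py : Prop := ∀ (content_type : Option String) (filename : Option String), Dom_resolve_file_type_py content_type filename → Spec_resolve_file_type_py content_type filename (resolve_file_type_py content_type filename)

-- ===== LEMMAS AND PROOFS =====

-- the char list after the LAST '.' of l (none if l has no '.')
def pvLds : List Char → Option (List Char)
  | [] => none
  | c :: l => if '.' ∈ l then pvLds l else if c = '.' then some l else none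

theorem pvLds_eq_none_iff (l : List Char) : pvLds l = none ↔ '.' ∉ l := by
  induction l with
  | nil => simp [pvLds]
  | cons c l ih =>
      by_cases h : '.' ∈ l
      · simp [pvLds, h, ih]
      · by_cases hc : c = '.'
        · simp [pvLds, h, hc]
        · simp [pvLds, h, hc, Ne.symm hc]

theorem pvLds_spec (l suf : List Char) (h : pvLds l = some suf) :
    ('.' :: suf) <:+ l ∧ '.' ∉ suf := by
  induction l with
  | nil => simp [pvLds] at h
  | cons c l ih =>
      by_cases hl : '.' ∈ l
      · simp only [pvLds, hl, if_pos] at h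
        obtain ⟨h1, h2⟩ := ih h
        exact ⟨h1.trans (List.suffix_cons c l), h2⟩
      · by_cases hc : c = '.'
        · simp only [pvLds, if_neg hl, if_pos hc, Option.some.injEq] at h
          subst h; exact ⟨hc ▸ List.suffix_refl _, hl⟩
        · simp [pvLds, hl, hc] at h

theorem pvLds_of_suffix (l k : List Char) (hk : '.' ∉ k) (h : ('.' :: k) <:+ l) :
    pvLds l = some k := by
  induction l with
  | nil => exact absurd (List.eq_nil_of_suffix_nil h) (by simp)
  | cons c l ih =>
      rcases List.suffix_cons_iff.mp h with heq | hsuf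
      · obtain ⟨hc, hl⟩ := List.cons.inj heq.symm
        subst hc; subst hl
        simp [pvLds, hk]
      · have hdl : '.' ∈ l := hsuf.subset (by simp)
        simp [pvLds, hdl, ih hsuf]

theorem pvFoldB_eq (l : List Char) (st : Option (List Char)) :
    l.foldl pvStepB st =
      match pvLds l with
      | some suf => some ('.' :: suf)
      | none => st.map (· ++ l) := by
  induction l generalizing st with
  | nil => cases st <;> simp [pvLds]
  | cons c l ih =>
      rw [List.foldl_cons, ih]
      by_cases hl : '.' ∈ l
      · obtain ⟨suf, hsuf⟩ := Option.ne_none_iff_exists'.mp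
          (fun hn => (pvLds_eq_none_iff l).mp hn hl : pvLds l ≠ none)
        simp [pvLds, hl, hsuf]
      · have hn : pvLds l = none := (pvLds_eq_none_iff l).mpr hl
        by_cases hc : c = '.'
        · simp [pvLds, hl, hc, hn, pvStepB]
        · cases st <;> simp [pvLds, hl, hc, hn, pvStepB]

-- an endswith test against a fallback key, read through pvLds
theorem pvEnds_iff (s : String) (key : String) (k : List Char)
    (hkey : key.toList = '.' :: k) (hk : '.' ∉ k) :
    PySem.Str.endswith s key = true ↔ pvLds s.toList = some k := by
  rw [PySem.Str.endswith_eq, PySem.Chars.endswith_iff, hkey]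
  constructor
  · exact pvLds_of_suffix _ _ hk
  · intro h; exact (pvLds_spec _ _ h).1

theorem pvItems_ext : pvExtensionFallback.items = pvExtItems := by decide

-- B's lookup of the reconstructed '.'-extension, as an if-chain on the char list
theorem pvKeyNe (suf k : List Char) (t : String) (ht : t.toList = '.' :: k)
    (hne : suf ≠ k) : String.ofList ('.' :: suf) ≠ t := by
  intro h
  have h2 := congrArg String.toList h
  rw [ht, String.toList_ofList] at h2
  exact hne (List.cons.inj h2).2

-- B's lookup of the reconstructed '.'-extension, as an if-chain on the char list
theorem pvLookup_eq (suf : List Char) :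
    pvExtensionFallback.get? (String.ofList ('.' :: suf)) =
      if suf = ['p','d','f'] then some "pdf"
      else if suf = ['c','s','v'] then some "csv"
      else if suf = ['x','l','s','x'] then some "xlsx"
      else if suf = ['x','l','s'] then some "xlsx"
      else if suf = ['j','p','g'] then some "jpg"
      else if suf = ['j','p','e','g'] then some "jpg"
      else if suf = ['p','n','g'] then some "png"
      else none := by
  by_cases h1 : suf = ['p','d','f']
  · subst h1; decide
  by_cases h2 : suf = ['c','s','v']
  · subst h2; simp [h1]; decide
  by_cases h3 : suf = ['x','l','s','x']
  · subst h3; simp [h1, h2]; decide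
  by_cases h4 : suf = ['x','l','s']
  · subst h4; simp [h1, h2, h3]; decide
  by_cases h5 : suf = ['j','p','g']
  · subst h5; simp [h1, h2, h3, h4]; decide
  by_cases h6 : suf = ['j','p','e','g']
  · subst h6; simp [h1, h2, h3, h4, h5]; decide
  by_cases h7 : suf = ['p','n','g']
  · subst h7; simp [h1, h2, h3, h4, h5, h6]; decide
  simp only [h1, h2, h3, h4, h5, h6, h7, if_false]
  rw [PySem.Dict.get?_eq_none_iff_not_mem_keys]
  have hkeys : pvExtensionFallback.keys = [".pdf", ".csv", ".xlsx", ".xls", ".jpg", ".jpeg", ".png"] := by decide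
  rw [hkeys]
  simp only [List.mem_cons, List.not_mem_nil, or_false, not_or]
  exact ⟨pvKeyNe suf _ _ (by decide) h1, pvKeyNe suf _ _ (by decide) h2,
         pvKeyNe suf _ _ (by decide) h3, pvKeyNe suf _ _ (by decide) h4,
         pvKeyNe suf _ _ (by decide) h5, pvKeyNe suf _ _ (by decide) h6,
         pvKeyNe suf _ _ (by decide) h7⟩

theorem pvToDecide (b : Bool) (p : Prop) [Decidable p] (h : b = true ↔ p) : b = decide p := by
  by_cases hp : p
  · simp [hp, h.mpr hp]
  · simp only [hp, decide_false]
    exact Bool.eq_false_iff.mpr (fun hb => hp (h.mp hb))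

theorem pvFallbackA_eq_spec (s : String) :
    pvLoopA pvExtensionFallback.items s =
      match pvLds s.toList with
      | some suf => pvExtensionFallback.get? (String.ofList ('.' :: suf))
      | none => none := by
  rw [pvItems_ext]
  have e1 := pvEnds_iff s ".pdf" ['p','d','f'] (by decide) (by decide)
  have e2 := pvEnds_iff s ".csv" ['c','s','v'] (by decide) (by decide)
  have e3 := pvEnds_iff s ".xlsx" ['x','l','s','x'] (by decide) (by decide)
  have e4 := pvEnds_iff s ".xls" ['x','l','s'] (by decide) (by decide)
  have e5 := pvEnds_iff s ".jpg" ['j','p','g'] (by decide) (by decide)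
  have e6 := pvEnds_iff s ".jpeg" ['j','p','e','g'] (by decide) (by decide)
  have e7 := pvEnds_iff s ".png" ['p','n','g'] (by decide) (by decide)
  cases h : pvLds s.toList with
  | none =>
      rw [h] at e1 e2 e3 e4 e5 e6 e7
      have b1 := Bool.eq_false_iff.mpr (fun hb => by cases e1.mp hb)
      have b2 := Bool.eq_false_iff.mpr (fun hb => by cases e2.mp hb)
      have b3 := Bool.eq_false_iff.mpr (fun hb => by cases e3.mp hb)
      have b4 := Bool.eq_false_iff.mpr (fun hb => by cases e4.mp hb)
      have b5 := Bool.eq_false_iff.mpr (fun hb => by cases e5.mp hb)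
      have b6 := Bool.eq_false_iff.mpr (fun hb => by cases e6.mp hb)
      have b7 := Bool.eq_false_iff.mpr (fun hb => by cases e7.mp hb)
      simp only [pvExtItems, pvLoopA, b1, b2, b3, b4, b5, b6, b7, Bool.false_eq_true, if_false]
  | some suf =>
      rw [h] at e1 e2 e3 e4 e5 e6 e7
      simp only [Option.some.injEq] at e1 e2 e3 e4 e5 e6 e7
      have b1 := pvToDecide _ _ e1
      have b2 := pvToDecide _ _ e2
      have b3 := pvToDecide _ _ e3
      have b4 := pvToDecide _ _ e4
      have b5 := pvToDecide _ _ e5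
      have b6 := pvToDecide _ _ e6
      have b7 := pvToDecide _ _ e7
      show pvLoopA pvExtItems s = pvExtensionFallback.get? (String.ofList ('.' :: suf))
      rw [pvLookup_eq]
      simp only [pvExtItems, pvLoopA, b1, b2, b3, b4, b5, b6, b7, decide_eq_true_eq]

theorem pvFallback_eq (filename : Option String) : pvFallbackA filename = pvFallbackB filename := by
  cases filename with
  | none => rfl
  | some f =>
      by_cases hf : f = ""
      · simp [pvFallbackA, pvFallbackB, hf]
      · simp only [pvFallbackA, pvFallbackB, hf, ite_false]
        rw [pvFallbackA_eq_spec, pvFoldB_eq]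
        cases h : pvLds (PySem.Str.lower f).toList <;> simp

-- ===== VERDICT (by name: the statement is the Claim_ definition above) =====
theorem resolve_file_type_py_spec : Claim_equal_resolve_file_type_py := by
  intro content_type filename _
  unfold Spec_resolve_file_type_py resolve_file_type_py resolve_file_type_py_alt
  cases content_type with
  | none => exact pvFallback_eq filename
  | some c =>
      by_cases hc : c = ""
      · simp [hc, pvFallback_eq filename]
      · have hcontains := PySem.Dict.contains_eq_isSome_get? (d := pvAllowedTypes) (k := c)
        cases hg : pvAllowedTypes.get? c with
        | some v =>
            have hct : pvAllowedTypes.contains c = true := by rw [hcontains, hg]; rfl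
            simp [hc, hg, hct]
        | none =>
            have hct : pvAllowedTypes.contains c = false := by rw [hcontains, hg]; rfl
            simp [hc, hg, hct, pvFallback_eq filename]
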